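-- pv_equiv track=rewrite | github.com/Neeraj-Palliyali/chegg_python | passwordStrength.py | checkCapitalChar
-- ===== SOURCE A (Python) =====
-- def checkCapitalChar(userPassword, score):
--     # flag for only adding score once
--     flag=0
--     # check if there are character (A-Z) Capital letters in password
--     for i in range(65, 91):
--         # 65-91 is the ascii equalent of A-Z
--         if(chr(i) in userPassword):
--             if(flag==0):
--                 score += 1
--                 flag = 1
--     return score
-- ===== SOURCE B (Python) =====
-- def checkCapitalChar(userPassword, score):
--     hasUpper = any('A' <= c <= 'Z' for c in userPassword)
--     return score + 1 if hasUpper else score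
-- ===== Notes on version B (the rewrite author's own statement) =====
-- stated objective: simpler
-- what changed: Replaces the 26-iteration loop over ASCII codes with substring tests and a once-only flag by a single any() pass over the password characters.
import Mathlib
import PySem

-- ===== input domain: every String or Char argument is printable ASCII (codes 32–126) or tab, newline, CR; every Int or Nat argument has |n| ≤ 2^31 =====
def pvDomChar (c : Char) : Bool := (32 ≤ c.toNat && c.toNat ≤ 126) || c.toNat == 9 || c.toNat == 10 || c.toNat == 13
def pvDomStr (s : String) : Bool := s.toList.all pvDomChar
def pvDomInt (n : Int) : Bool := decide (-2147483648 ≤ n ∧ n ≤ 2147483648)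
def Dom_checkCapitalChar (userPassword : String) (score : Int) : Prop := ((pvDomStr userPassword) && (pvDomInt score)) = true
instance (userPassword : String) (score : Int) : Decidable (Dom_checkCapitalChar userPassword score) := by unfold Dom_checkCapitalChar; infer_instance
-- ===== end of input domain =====

-- B replaces A's 26-iteration loop over ASCII codes (with a once-only flag) by a single any-pass over the password; same return value.


-- ===== PORT A =====
-- 'chr(i) in userPassword' for a single character is exactly list membership of that character.
def checkCapitalChar (userPassword : String) (score : Int) : Int :=
  ((PySem.List.pyRange 65 91 1).foldl
    (fun (st : Int × Int) i =>
      if userPassword.toList.contains (Char.ofNat i.toNat) then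
        if st.2 = 0 then (st.1 + 1, 1) else st
      else st)
    (score, 0)).1

-- ===== PORT B =====
def checkCapitalChar_alt (userPassword : String) (score : Int) : Int :=
  if userPassword.toList.any (fun c => 'A' ≤ c && c ≤ 'Z') then score + 1 else score

-- ===== PRECONDITION & SPEC =====
def Spec_checkCapitalChar (userPassword : String) (score : Int) (out : Int) : Prop := out = checkCapitalChar_alt userPassword score
instance (userPassword : String) (score : Int) (out : Int) : Decidable (Spec_checkCapitalChar userPassword score out) := by unfold Spec_checkCapitalChar; infer_instance

-- ===== CLAIM (what is proved, stated in full; the proofs are below) =====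
def Claim_equal_checkCapitalChar : Prop := ∀ (userPassword : String) (score : Int), Dom_checkCapitalChar userPassword score → Spec_checkCapitalChar userPassword score (checkCapitalChar userPassword score)

-- ===== LEMMAS AND PROOFS =====

-- A's loop body, abstracted over the character list.
def pvStep (cs : List Char) (st : Int × Int) (i : Int) : Int × Int :=
  if cs.contains (Char.ofNat i.toNat) then
    if st.2 = 0 then (st.1 + 1, 1) else st
  else st

lemma pvStep_flag_set (cs : List Char) (l : List Int) (s : Int) :
    l.foldl (pvStep cs) (s, 1) = (s, 1) := by
  induction l with
  | nil => rfl
  | cons i l ih => simp [pvStep, ih]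

lemma pvStep_fold (cs : List Char) (l : List Int) (s : Int) :
    l.foldl (pvStep cs) (s, 0)
      = if l.any (fun i => cs.contains (Char.ofNat i.toNat)) then (s + 1, 1) else (s, 0) := by
  induction l generalizing s with
  | nil => rfl
  | cons i l ih =>
    by_cases h : Char.ofNat i.toNat ∈ cs
    · simp [pvStep, h, pvStep_flag_set]
    · simp [pvStep, h, ih]

lemma pvAny_range (cs : List Char) :
    (PySem.List.pyRange 65 91 1).any (fun i => cs.contains (Char.ofNat i.toNat))
      = cs.any (fun c => 'A' ≤ c && c ≤ 'Z') := by
  rw [Bool.eq_iff_iff]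
  simp only [List.any_eq_true, PySem.List.mem_pyRange_one, List.contains_eq_mem,
    Bool.and_eq_true, decide_eq_true_eq]
  constructor
  · rintro ⟨i, ⟨h65, h91⟩, hmem⟩
    refine ⟨Char.ofNat i.toNat, hmem, ?_, ?_⟩ <;> (interval_cases i <;> decide)
  · rintro ⟨c, hmem, hA, hZ⟩
    have h1 : (65 : Nat) ≤ c.toNat := UInt32.le_iff_toNat_le.mp (Char.le_def.mp hA)
    have h2 : c.toNat ≤ (90 : Nat) := UInt32.le_iff_toNat_le.mp (Char.le_def.mp hZ)
    refine ⟨(c.toNat : Int), ⟨by omega, by omega⟩, ?_⟩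
    simpa [Char.ofNat_toNat] using hmem

-- ===== VERDICT (by name: the statement is the Claim_ definition above) =====
theorem checkCapitalChar_spec : Claim_equal_checkCapitalChar := by
  intro userPassword score _
  show checkCapitalChar userPassword score = checkCapitalChar_alt userPassword score
  unfold checkCapitalChar checkCapitalChar_alt
  rw [show (fun (st : Int × Int) i =>
      if userPassword.toList.contains (Char.ofNat i.toNat) then
        if st.2 = 0 then (st.1 + 1, 1) else st
      else st) = pvStep userPassword.toList from rfl,
    pvStep_fold, pvAny_range]
  split <;> rfl
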